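-- pv_equiv track=rewrite | github.com/sftroychance/DSATextbookExercises | W1D3 binary search/minimum_count.py | find_first_positive
-- ===== SOURCE A (Python) =====
-- def find_first_positive(arr, last_negative):
--     left = last_negative + 1
--     right = len(arr) - 1
--     first_positive = len(arr)
--
--     while left <= right:
--         mid = (left + right) // 2
--
--         if arr[mid] > 0:
--             # first_positive = min(first_positive, mid)
--             first_positive = mid
--             right = mid - 1
--         else:
--             left = mid + 1
--
--     return first_positive
-- ===== SOURCE B (Python) =====
-- def find_first_positive(arr, last_negative):
--     # Half-open interval [lo, hi): no best-so-far accumulator; hi IS the answer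
--     # once the interval empties (a positive probe becomes the new hi, a
--     # non-positive probe pushes lo past it).
--     def go(lo, hi):
--         if lo >= hi:
--             return hi
--         mid = (lo + hi - 1) // 2
--         return go(lo, mid) if arr[mid] > 0 else go(mid + 1, hi)
--     return go(last_negative + 1, len(arr))
-- ===== Notes on version B (the rewrite author's own statement) =====
-- stated objective: alternative
-- what changed: A's three-variable loop with a best-so-far accumulator is replaced by a recursive half-open-interval search with no accumulator at all: the upper bound of the shrinking interval is itself the answer (a positive probe becomes the new upper bound), returned when the interval empties.
-- outside the precondition, e.g. on find_first_positive([0, 0, 5], -5): A returns -1, B returns -1; on find_first_positive([1, 2, 3], -5): A raises IndexError, B raises IndexError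
import Mathlib
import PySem

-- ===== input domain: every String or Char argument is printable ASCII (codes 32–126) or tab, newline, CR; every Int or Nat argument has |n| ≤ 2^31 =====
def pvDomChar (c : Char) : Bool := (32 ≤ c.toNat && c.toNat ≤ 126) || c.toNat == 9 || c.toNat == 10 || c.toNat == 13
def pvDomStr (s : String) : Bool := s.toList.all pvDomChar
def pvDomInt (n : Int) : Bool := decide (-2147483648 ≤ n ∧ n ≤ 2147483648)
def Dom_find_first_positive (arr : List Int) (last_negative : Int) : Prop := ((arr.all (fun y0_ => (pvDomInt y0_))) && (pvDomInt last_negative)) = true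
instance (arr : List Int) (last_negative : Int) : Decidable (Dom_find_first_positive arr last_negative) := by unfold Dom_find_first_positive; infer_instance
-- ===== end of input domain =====

-- B drops A's best-so-far accumulator: a recursive half-open-interval search whose upper
-- bound is itself the answer (alternative decomposition, same cost).


-- ===== PORT A =====
-- the while-loop, state (left, right, first_positive); arr[mid] as Python negative-index
-- access via pyGet? (default 0 is never consulted under Pre_)
def ffpLoop (arr : List Int) (left right first_positive : Int) : Int :=
  if left ≤ right then
    let mid := PySem.Int.floordiv (left + right) 2
    if ((PySem.List.pyGet? arr mid).getD 0) > 0 then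
      ffpLoop arr left (mid - 1) mid
    else
      ffpLoop arr (mid + 1) right first_positive
  else first_positive
termination_by (right + 1 - left).toNat
decreasing_by
  · have h := PySem.Int.floordiv_two_mid_bounds (by assumption : left ≤ right)
    omega
  · have h := PySem.Int.floordiv_two_mid_bounds (by assumption : left ≤ right)
    omega

def find_first_positive (arr : List Int) (last_negative : Int) : Int :=
  ffpLoop arr (last_negative + 1) ((arr.length : Int) - 1) (arr.length : Int)

-- ===== PORT B =====
-- go(lo, hi) on the half-open window [lo, hi): returns hi when the window is empty;
-- a positive probe at mid = (lo + hi - 1) // 2 shrinks the window to [lo, mid),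
-- a non-positive one to [mid + 1, hi)
def ffpGo (arr : List Int) (lo hi : Int) : Int :=
  if lo ≥ hi then hi
  else
    let mid := PySem.Int.floordiv (lo + hi - 1) 2
    if ((PySem.List.pyGet? arr mid).getD 0) > 0 then ffpGo arr lo mid
    else ffpGo arr (mid + 1) hi
termination_by (hi - lo).toNat
decreasing_by
  all_goals
    have h := PySem.Int.floordiv_two_mid_bounds (by omega : lo ≤ hi - 1)
    have e : lo + (hi - 1) = lo + hi - 1 := by ring
    rw [e] at h
    omega

def find_first_positive_alt (arr : List Int) (last_negative : Int) : Int :=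
  ffpGo arr (last_negative + 1) (arr.length : Int)

-- ===== PRECONDITION & SPEC =====
-- Pre_ keeps the search window's start at or above -len(arr): below that Python A (and B
-- alike) probes arr[mid] with mid < -len and usually raises IndexError; on the few such
-- inputs where the probes happen to stay in range both programs still return the same
-- negatively-wrapped index, but they lie outside the function's natural domain.
def Pre_find_first_positive (arr : List Int) (last_negative : Int) : Prop :=
  -(arr.length : Int) ≤ last_negative + 1
instance (arr : List Int) (last_negative : Int) : Decidable (Pre_find_first_positive arr last_negative) := by unfold Pre_find_first_positive; infer_instance

def pvWitness_find_first_positive : List Int × Int := ([-3, -1, 0, 2, 5], 2)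

def Spec_find_first_positive (arr : List Int) (last_negative : Int) (out : Int) : Prop := out = find_first_positive_alt arr last_negative
instance (arr : List Int) (last_negative : Int) (out : Int) : Decidable (Spec_find_first_positive arr last_negative out) := by unfold Spec_find_first_positive; infer_instance

-- ===== CLAIM (what is proved, stated in full; the proofs are below) =====
def Claim_equal_find_first_positive : Prop := ∀ (arr : List Int) (last_negative : Int), Dom_find_first_positive arr last_negative → Pre_find_first_positive arr last_negative → Spec_find_first_positive arr last_negative (find_first_positive arr last_negative)

-- ===== LEMMAS AND PROOFS =====
-- Recursion/loop correspondence. A maintains the invariant first_positive = right + 1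
-- (both updates preserve it, and it holds initially), so B's recursion on the half-open
-- window [lo, hi) IS A's loop on the inclusive window [lo, hi - 1] with accumulator hi:
-- the probe indices coincide ((lo + hi - 1) // 2 = (left + right) // 2 with right = hi - 1)
-- and B's returned upper bound is exactly A's returned accumulator.
lemma ffpGo_eq_loop (arr : List Int) (lo hi : Int) :
    ffpGo arr lo hi = ffpLoop arr lo (hi - 1) hi := by
  fun_induction ffpGo arr lo hi with
  | case1 lo hi hge =>
      rw [ffpLoop, if_neg (by omega : ¬ lo ≤ hi - 1)]
  | case2 lo hi hge mid hpos ih =>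
      rw [ffpLoop, if_pos (by omega : lo ≤ hi - 1)]
      have hm : PySem.Int.floordiv (lo + (hi - 1)) 2 = mid := by
        show PySem.Int.floordiv (lo + (hi - 1)) 2 = PySem.Int.floordiv (lo + hi - 1) 2
        congr 1; ring
      simp only [hm, if_pos hpos]
      exact ih
  | case3 lo hi hge mid hpos ih =>
      rw [ffpLoop, if_pos (by omega : lo ≤ hi - 1)]
      have hm : PySem.Int.floordiv (lo + (hi - 1)) 2 = mid := by
        show PySem.Int.floordiv (lo + (hi - 1)) 2 = PySem.Int.floordiv (lo + hi - 1) 2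
        congr 1; ring
      simp only [hm, if_neg hpos]
      exact ih

-- ===== VERDICT (by name: the statement is the Claim_ definition above) =====
theorem find_first_positive_spec : Claim_equal_find_first_positive := by
  intro arr last_negative _ _
  unfold Spec_find_first_positive find_first_positive find_first_positive_alt
  rw [ffpGo_eq_loop]
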